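-- pv_equiv track=rewrite | github.com/MangiafestoElectronicsLLC/MEOS | repository.meos/providers/archive_org.py | _best_video_file
-- ===== SOURCE A (Python) =====
-- def _best_video_file(files):
--     """Pick the most playback-compatible video file from Archive.org metadata."""
--     mp4_h264 = []
--     mp4_any = []
--     ogv = []
--     for f in files:
--         name = f.get("name", "")
--         fmt = (f.get("format") or "").lower()
--         if name.lower().endswith(".mp4"):
--             if "h.264" in fmt or "mpeg4" in fmt or "mp4" in fmt:
--                 mp4_h264.append(name)
--             else:
--                 mp4_any.append(name)
--         elif name.lower().endswith(".ogv"):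
--             ogv.append(name)
--
--     for candidates in (mp4_h264, mp4_any, ogv):
--         if candidates:
--             return candidates[0]
--     return None
-- ===== SOURCE B (Python) =====
-- def _best_video_file(files):
--     """Pick the most playback-compatible video file from Archive.org metadata.
--
--     Single pass: score each file (0 best .mp4, 1 other .mp4, 2 .ogv, else
--     ineligible) and keep the first file with the smallest score seen so far.
--     """
--     best = None  # (priority, name); updated only on strict improvement
--     for f in files:
--         name = f.get("name", "")
--         fmt = (f.get("format") or "").lower()
--         if name.lower().endswith(".mp4"):
--             p = 0 if ("h.264" in fmt or "mpeg4" in fmt or "mp4" in fmt) else 1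
--         elif name.lower().endswith(".ogv"):
--             p = 2
--         else:
--             continue
--         if best is None or p < best[0]:
--             best = (p, name)
--     return None if best is None else best[1]
-- ===== Notes on version B (the rewrite author's own statement) =====
-- stated objective: simpler
-- what changed: Replaces the three-bucket list build plus ordered bucket scan with a single pass keeping one (priority, name) best candidate, updated only on strict improvement so ties break to the first occurrence.
import Mathlib
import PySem

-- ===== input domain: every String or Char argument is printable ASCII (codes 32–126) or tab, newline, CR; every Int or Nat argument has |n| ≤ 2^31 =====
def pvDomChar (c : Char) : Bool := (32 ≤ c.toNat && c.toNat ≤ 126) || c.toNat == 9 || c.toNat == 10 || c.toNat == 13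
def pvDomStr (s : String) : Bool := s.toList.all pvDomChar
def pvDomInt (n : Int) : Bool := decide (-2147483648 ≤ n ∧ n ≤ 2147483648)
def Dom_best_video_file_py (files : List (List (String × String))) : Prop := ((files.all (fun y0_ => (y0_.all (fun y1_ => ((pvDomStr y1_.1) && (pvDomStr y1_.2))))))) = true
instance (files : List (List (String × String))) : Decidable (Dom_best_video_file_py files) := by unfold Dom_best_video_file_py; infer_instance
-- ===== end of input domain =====

-- B replaces A's three-bucket build + ordered bucket scan with one pass keeping a single
-- (priority, name) best candidate updated on strict improvement (objective: simpler).

-- f.get(key, "") / (f.get(key) or "") — first-match association-list lookup, "" when absent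
-- (exact: values are strings, and Python's `or ""` maps both None and "" to "")
def pvLookup (f : List (String × String)) (k : String) : String :=
  match f.find? (fun p => p.1 == k) with
  | some p => p.2
  | none => ""

-- ===== PORT A =====
def bvfLoopA : List (List (String × String)) → List String → List String → List String →
    List String × List String × List String
  | [], a, b, c => (a, b, c)
  | f :: rest, a, b, c =>
    let name := pvLookup f "name"
    let fmt := PySem.Str.lower (pvLookup f "format")
    if PySem.Str.endswith (PySem.Str.lower name) ".mp4" then
      if PySem.Str.isIn "h.264" fmt || PySem.Str.isIn "mpeg4" fmt || PySem.Str.isIn "mp4" fmt then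
        bvfLoopA rest (a ++ [name]) b c
      else
        bvfLoopA rest a (b ++ [name]) c
    else if PySem.Str.endswith (PySem.Str.lower name) ".ogv" then
      bvfLoopA rest a b (c ++ [name])
    else
      bvfLoopA rest a b c

def best_video_file_py (files : List (List (String × String))) : Option String :=
  match bvfLoopA files [] [] [] with
  | (mp4_h264, mp4_any, ogv) =>
    match mp4_h264 with
    | x :: _ => some x
    | [] =>
      match mp4_any with
      | y :: _ => some y
      | [] =>
        match ogv with
        | z :: _ => some z
        | [] => none

-- ===== PORT B =====
-- 'best is None or p < best[0]' update
def bvfUpd (best : Option (Nat × String)) (p : Nat) (name : String) : Option (Nat × String) :=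
  match best with
  | none => some (p, name)
  | some b => if p < b.1 then some (p, name) else some b

def bvfLoopB : List (List (String × String)) → Option (Nat × String) → Option (Nat × String)
  | [], best => best
  | f :: rest, best =>
    let name := pvLookup f "name"
    let fmt := PySem.Str.lower (pvLookup f "format")
    if PySem.Str.endswith (PySem.Str.lower name) ".mp4" then
      let p : Nat :=
        if PySem.Str.isIn "h.264" fmt || PySem.Str.isIn "mpeg4" fmt || PySem.Str.isIn "mp4" fmt
        then 0 else 1
      bvfLoopB rest (bvfUpd best p name)
    else if PySem.Str.endswith (PySem.Str.lower name) ".ogv" then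
      bvfLoopB rest (bvfUpd best 2 name)
    else
      bvfLoopB rest best

def best_video_file_py_alt (files : List (List (String × String))) : Option String :=
  (bvfLoopB files none).map (·.2)

-- ===== PRECONDITION & SPEC =====
def Spec_best_video_file_py (files : List (List (String × String))) (out : Option String) : Prop := out = best_video_file_py_alt files
instance (files : List (List (String × String))) (out : Option String) : Decidable (Spec_best_video_file_py files out) := by unfold Spec_best_video_file_py; infer_instance

-- ===== CLAIM (what is proved, stated in full; the proofs are below) =====
def Claim_equal_best_video_file_py : Prop := ∀ (files : List (List (String × String))), Dom_best_video_file_py files → Spec_best_video_file_py files (best_video_file_py files)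

-- ===== LEMMAS AND PROOFS =====

-- abstraction relating A's bucket state to B's single best candidate
def bvfInv (a b c : List String) : Option (Nat × String) :=
  match a with
  | x :: _ => some (0, x)
  | [] =>
    match b with
    | y :: _ => some (1, y)
    | [] =>
      match c with
      | z :: _ => some (2, z)
      | [] => none

lemma bvfInv_app0 (a b c : List String) (n : String) :
    bvfInv (a ++ [n]) b c = bvfUpd (bvfInv a b c) 0 n := by
  rcases a with _ | ⟨x, a⟩ <;> rcases b with _ | ⟨y, b⟩ <;> rcases c with _ | ⟨z, c⟩ <;>
    simp [bvfInv, bvfUpd]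

lemma bvfInv_app1 (a b c : List String) (n : String) :
    bvfInv a (b ++ [n]) c = bvfUpd (bvfInv a b c) 1 n := by
  rcases a with _ | ⟨x, a⟩ <;> rcases b with _ | ⟨y, b⟩ <;> rcases c with _ | ⟨z, c⟩ <;>
    simp [bvfInv, bvfUpd]

lemma bvfInv_app2 (a b c : List String) (n : String) :
    bvfInv a b (c ++ [n]) = bvfUpd (bvfInv a b c) 2 n := by
  rcases a with _ | ⟨x, a⟩ <;> rcases b with _ | ⟨y, b⟩ <;> rcases c with _ | ⟨z, c⟩ <;>
    simp [bvfInv, bvfUpd]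

-- A's final bucket scan equals projecting the abstraction
lemma bvfFinish (a b c : List String) :
    (match a with
     | x :: _ => some x
     | [] =>
       match b with
       | y :: _ => some y
       | [] =>
         match c with
         | z :: _ => some z
         | [] => (none : Option String)) = (bvfInv a b c).map (·.2) := by
  rcases a with _ | ⟨x, a⟩ <;> rcases b with _ | ⟨y, b⟩ <;> rcases c with _ | ⟨z, c⟩ <;>
    simp [bvfInv]

lemma bvfLoop_agree : ∀ (files : List (List (String × String))) (a b c : List String),
    bvfInv (bvfLoopA files a b c).1 (bvfLoopA files a b c).2.1 (bvfLoopA files a b c).2.2 =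
      bvfLoopB files (bvfInv a b c) := by
  intro files
  induction files with
  | nil => intro a b c; simp [bvfLoopA, bvfLoopB]
  | cons f rest ih =>
    intro a b c
    simp only [bvfLoopA, bvfLoopB]
    split_ifs with h1 h2 h3
    · rw [ih, bvfInv_app0]
    · rw [ih, bvfInv_app1]
    · rw [ih, bvfInv_app2]
    · rw [ih]

-- ===== VERDICT (by name: the statement is the Claim_ definition above) =====
theorem best_video_file_py_spec : Claim_equal_best_video_file_py := by
  intro files _
  unfold Spec_best_video_file_py best_video_file_py best_video_file_py_alt
  rcases hA : bvfLoopA files [] [] [] with ⟨a, b, c⟩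
  have h := bvfLoop_agree files [] [] []
  rw [hA] at h
  simp only [bvfInv] at h
  rw [← h]
  exact bvfFinish a b c
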